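-- pv_equiv track=rewrite | github.com/nadiiagut/ai-requirement-readiness-analyzer | src/api.py | _compute_sprint_health_from_labels
-- ===== SOURCE A (Python) =====
-- def _compute_sprint_health_from_labels(issue_labels_list: list[list[str]]) -> int:
--     """
--     Compute sprint health score (1-100) based on issue labels.
--
--     Label weights:
--     - ready-for-sprint / ready / sprint-ready / dev-ready: 90
--     - needs-review: 70
--     - needs-refinement / backlog: 45
--     - no relevant label: 65
--
--     Returns average score clamped to 1-100.
--     If no issues, returns 0.
--     """
--     if not issue_labels_list:
--         return 0
--
--     scores = []
--     for labels in issue_labels_list: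
--         labels_lower = [l.lower() for l in labels]
--
--         # Check for ready labels
--         if any(l in labels_lower for l in ["ready-for-sprint", "ready", "sprint-ready", "dev-ready"]):
--             scores.append(90)
--         # Check for needs-review
--         elif any(l in labels_lower for l in ["needs-review", "review"]):
--             scores.append(70)
--         # Check for needs-refinement
--         elif any(l in labels_lower for l in ["needs-refinement", "backlog", "refinement"]):
--             scores.append(45)
--         # No relevant label
--         else:
--             scores.append(65)
--
--     avg_score = sum(scores) / len(scores)
--     return max(1, min(100, int(avg_score)))
-- ===== SOURCE B (Python) =====
-- _RANK = {
--     "ready-for-sprint": 0, "ready": 0, "sprint-ready": 0, "dev-ready": 0,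
--     "needs-review": 1, "review": 1,
--     "needs-refinement": 2, "backlog": 2, "refinement": 2,
-- }
-- _SCORE = [90, 70, 45, 65]
--
--
-- def _compute_sprint_health_from_labels(issue_labels_list: list) -> int:
--     if not issue_labels_list:
--         return 0
--     total = 0
--     for labels in issue_labels_list:
--         rank = 3
--         for l in labels:
--             rank = min(rank, _RANK.get(l.lower(), 3))
--         total += _SCORE[rank]
--     return max(1, min(100, total // len(issue_labels_list)))
-- ===== Notes on version B (the rewrite author's own statement) =====
-- stated objective: simpler
-- what changed: Replaces the three sequential category membership passes (building a scores list, then summing) by a single scan of each issue's labels against one label->priority-rank dict, keeping a running minimum rank and a running total; the final rank indexes a 4-entry score table.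
import Mathlib
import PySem

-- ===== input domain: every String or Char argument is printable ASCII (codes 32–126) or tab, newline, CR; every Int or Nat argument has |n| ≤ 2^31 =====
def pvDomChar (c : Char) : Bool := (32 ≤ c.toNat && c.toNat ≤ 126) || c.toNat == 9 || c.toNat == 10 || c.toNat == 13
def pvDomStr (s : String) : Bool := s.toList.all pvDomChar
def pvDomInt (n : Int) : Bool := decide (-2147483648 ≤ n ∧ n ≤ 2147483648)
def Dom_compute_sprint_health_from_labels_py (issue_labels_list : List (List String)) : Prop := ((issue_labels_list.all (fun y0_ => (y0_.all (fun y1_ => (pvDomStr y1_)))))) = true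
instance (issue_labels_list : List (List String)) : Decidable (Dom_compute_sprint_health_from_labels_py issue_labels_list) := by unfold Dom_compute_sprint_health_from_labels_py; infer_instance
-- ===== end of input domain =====

-- B replaces A's three sequential category passes per issue by a single label scan
-- tracking the minimum priority rank via one dict, indexing a 4-entry score table (objective: simpler).


-- ===== PORT A =====
-- per-issue score: the three category checks in A's order
def csA_issue (labels : List String) : Int :=
  let labels_lower := labels.map PySem.Str.lower
  if (["ready-for-sprint", "ready", "sprint-ready", "dev-ready"].any
        (fun l => labels_lower.contains l)) then 90
  else if (["needs-review", "review"].any (fun l => labels_lower.contains l)) then 70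
  else if (["needs-refinement", "backlog", "refinement"].any
        (fun l => labels_lower.contains l)) then 45
  else 65

def compute_sprint_health_from_labels_py (issue_labels_list : List (List String)) : Int :=
  if issue_labels_list = [] then 0
  else
    let scores := issue_labels_list.foldl (fun acc labels => acc ++ [csA_issue labels]) []
    -- int(sum/len): scores are nonnegative ints ≤ 90, so Python's float division followed by
    -- int() truncation is exactly floor division here (a non-integral true ratio is ≥ 1/len
    -- from any integer, far beyond double rounding error).
    max 1 (min 100 (PySem.Int.floordiv scores.sum (scores.length : Int)))

-- ===== PORT B =====
def csB_RANK : PySem.Dict String Int :=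
  PySem.Dict.ofList
    [("ready-for-sprint", 0), ("ready", 0), ("sprint-ready", 0), ("dev-ready", 0),
     ("needs-review", 1), ("review", 1),
     ("needs-refinement", 2), ("backlog", 2), ("refinement", 2)]

def csB_rank (l : String) : Int := csB_RANK.getD (PySem.Str.lower l) 3

-- _SCORE[rank]; rank is always in 0..3
def csB_score (rank : Int) : Int := PySem.List.pyGetD [(90 : Int), 70, 45, 65] rank 0

def compute_sprint_health_from_labels_py_alt (issue_labels_list : List (List String)) : Int :=
  if issue_labels_list = [] then 0
  else
    let total := issue_labels_list.foldl
      (fun t labels => t + csB_score (labels.foldl (fun r l => min r (csB_rank l)) 3)) 0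
    max 1 (min 100 (PySem.Int.floordiv total (issue_labels_list.length : Int)))

-- ===== PRECONDITION & SPEC =====
def Spec_compute_sprint_health_from_labels_py (issue_labels_list : List (List String)) (out : Int) : Prop := out = compute_sprint_health_from_labels_py_alt issue_labels_list
instance (issue_labels_list : List (List String)) (out : Int) : Decidable (Spec_compute_sprint_health_from_labels_py issue_labels_list out) := by unfold Spec_compute_sprint_health_from_labels_py; infer_instance

-- ===== CLAIM (what is proved, stated in full; the proofs are below) =====
def Claim_equal_compute_sprint_health_from_labels_py : Prop := ∀ (issue_labels_list : List (List String)), Dom_compute_sprint_health_from_labels_py issue_labels_list → Spec_compute_sprint_health_from_labels_py issue_labels_list (compute_sprint_health_from_labels_py issue_labels_list)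

-- ===== LEMMAS AND PROOFS =====

-- explicit characterisation of the rank of a (raw, un-lowered) label
lemma csB_RANK_mk : csB_RANK = PySem.Dict.mk
    [("ready-for-sprint", 0), ("ready", 0), ("sprint-ready", 0), ("dev-ready", 0),
     ("needs-review", 1), ("review", 1),
     ("needs-refinement", 2), ("backlog", 2), ("refinement", 2)] := by decide

lemma csB_rank_eq (l : String) : csB_rank l =
    (if "ready-for-sprint" = PySem.Str.lower l ∨ "ready" = PySem.Str.lower l ∨
        "sprint-ready" = PySem.Str.lower l ∨ "dev-ready" = PySem.Str.lower l then 0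
     else if "needs-review" = PySem.Str.lower l ∨ "review" = PySem.Str.lower l then 1
     else if "needs-refinement" = PySem.Str.lower l ∨ "backlog" = PySem.Str.lower l ∨
        "refinement" = PySem.Str.lower l then 2
     else 3) := by
  unfold csB_rank
  rw [csB_RANK_mk]
  simp only [PySem.Dict.getD, PySem.Dict.get?_mk_cons]
  split_ifs <;> simp_all [PySem.Dict.get?]

-- A's three category conditions, rephrased through csB_rank
lemma any_cat0 (labels : List String) :
    (["ready-for-sprint", "ready", "sprint-ready", "dev-ready"].any
        (fun l => (labels.map PySem.Str.lower).contains l)) =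
    labels.any (fun l => csB_rank l == 0) := by
  rw [Bool.eq_iff_iff]
  simp only [List.any_eq_true, List.contains_iff_mem, List.mem_map, csB_rank_eq]
  constructor
  · rintro ⟨c, hc, x, hx, hcx⟩
    refine ⟨x, hx, ?_⟩
    fin_cases hc <;> simp [hcx]
  · rintro ⟨x, hx, h⟩
    split_ifs at h with h0 h1 h2 <;> try simp_all
    refine ⟨x, ?_, hx⟩
    rcases h0 with h | h | h | h
    · exact Or.inl h.symm
    · exact Or.inr (Or.inl h.symm)
    · exact Or.inr (Or.inr (Or.inl h.symm))
    · exact Or.inr (Or.inr (Or.inr h.symm))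

lemma any_cat1 (labels : List String) :
    (["needs-review", "review"].any (fun l => (labels.map PySem.Str.lower).contains l)) =
    labels.any (fun l => csB_rank l == 1) := by
  rw [Bool.eq_iff_iff]
  simp only [List.any_eq_true, List.contains_iff_mem, List.mem_map, csB_rank_eq]
  constructor
  · rintro ⟨c, hc, x, hx, hcx⟩
    refine ⟨x, hx, ?_⟩
    fin_cases hc <;> simp [hcx]
  · rintro ⟨x, hx, h⟩
    split_ifs at h with h0 h1 h2 <;> try simp_all
    refine ⟨x, ?_, hx⟩
    rcases h1 with h | h
    · exact Or.inl h.symm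
    · exact Or.inr h.symm

lemma any_cat2 (labels : List String) :
    (["needs-refinement", "backlog", "refinement"].any
        (fun l => (labels.map PySem.Str.lower).contains l)) =
    labels.any (fun l => csB_rank l == 2) := by
  rw [Bool.eq_iff_iff]
  simp only [List.any_eq_true, List.contains_iff_mem, List.mem_map, csB_rank_eq]
  constructor
  · rintro ⟨c, hc, x, hx, hcx⟩
    refine ⟨x, hx, ?_⟩
    fin_cases hc <;> simp [hcx]
  · rintro ⟨x, hx, h⟩
    split_ifs at h with h0 h1 h2 <;> try simp_all
    refine ⟨x, ?_, hx⟩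
    rcases h2 with h | h | h
    · exact Or.inl h.symm
    · exact Or.inr (Or.inl h.symm)
    · exact Or.inr (Or.inr h.symm)

-- the minimum rank of an issue, written as A sees it
def rankMin (labels : List String) : Int :=
  if labels.any (fun l => csB_rank l == 0) then 0
  else if labels.any (fun l => csB_rank l == 1) then 1
  else if labels.any (fun l => csB_rank l == 2) then 2
  else 3

lemma csB_rank_cases (l : String) :
    csB_rank l = 0 ∨ csB_rank l = 1 ∨ csB_rank l = 2 ∨ csB_rank l = 3 := by
  rw [csB_rank_eq]; split_ifs <;> simp

lemma rankMin_cons (l : String) (rest : List String) :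
    rankMin (l :: rest) = min (csB_rank l) (rankMin rest) := by
  rcases csB_rank_cases l with h | h | h | h <;>
    simp only [rankMin, List.any_cons, h] <;> norm_num <;> split_ifs <;> omega

lemma rankMin_bounds (labels : List String) : 0 ≤ rankMin labels ∧ rankMin labels ≤ 3 := by
  unfold rankMin; split_ifs <;> omega

lemma fold_min_eq (labels : List String) (r : Int) (hr : r ≤ 3) :
    labels.foldl (fun a l => min a (csB_rank l)) r = min r (rankMin labels) := by
  induction labels generalizing r with
  | nil => simp [rankMin]; omega
  | cons l rest ih =>
      simp only [List.foldl_cons]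
      rw [ih (min r (csB_rank l)) (by omega), rankMin_cons, min_assoc]

lemma score_issue_eq (labels : List String) :
    csA_issue labels = csB_score (labels.foldl (fun r l => min r (csB_rank l)) 3) := by
  rw [fold_min_eq labels 3 le_rfl]
  have hb := rankMin_bounds labels
  have hmin : min (3 : Int) (rankMin labels) = rankMin labels := by omega
  rw [hmin]
  simp only [csA_issue, rankMin, any_cat0, any_cat1, any_cat2]
  split_ifs <;> decide

theorem main_eq (xs : List (List String)) :
    compute_sprint_health_from_labels_py xs = compute_sprint_health_from_labels_py_alt xs := by
  unfold compute_sprint_health_from_labels_py compute_sprint_health_from_labels_py_alt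
  by_cases h : xs = []
  · simp [h]
  · simp only [h, if_false]
    rw [PySem.List.foldl_append_singleton_eq_map]
    have hmap : xs.map csA_issue =
        xs.map (fun labels => csB_score (labels.foldl (fun r l => min r (csB_rank l)) 3)) :=
      List.map_congr_left fun labels _ => score_issue_eq labels
    have hsum : (xs.map (fun labels =>
        csB_score (labels.foldl (fun r l => min r (csB_rank l)) 3))).sum =
        xs.foldl (fun t labels =>
          t + csB_score (labels.foldl (fun r l => min r (csB_rank l)) 3)) 0 := by
      rw [PySem.List.foldl_add]; simp
    simp only [List.nil_append, List.length_map, hmap, hsum]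

-- ===== VERDICT (by name: the statement is the Claim_ definition above) =====
theorem compute_sprint_health_from_labels_py_spec : Claim_equal_compute_sprint_health_from_labels_py := by
  intro xs _
  unfold Spec_compute_sprint_health_from_labels_py
  exact main_eq xs
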